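-- pv_equiv track=rewrite | github.com/prown2pwn/KWS-Rosalind-Work | ROSALIND_MRNA.py | RevTrans
-- ===== SOURCE A (Python) =====
-- RNA_Codons = {
--     # 'M' - START, '_' - STOP
--     "GCU": "A", "GCC": "A", "GCA": "A", "GCG": "A",
--     "UGU": "C", "UGC": "C",
--     "GAU": "D", "GAC": "D",
--     "GAA": "E", "GAG": "E",
--     "UUU": "F", "UUC": "F",
--     "GGU": "G", "GGC": "G", "GGA": "G", "GGG": "G",
--     "CAU": "H", "CAC": "H",
--     "AUA": "I", "AUU": "I", "AUC": "I",
--     "AAA": "K", "AAG": "K",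
--     "UUA": "L", "UUG": "L", "CUU": "L", "CUC": "L", "CUA": "L", "CUG": "L",
--     "AUG": "M",
--     "AAU": "N", "AAC": "N",
--     "CCU": "P", "CCC": "P", "CCA": "P", "CCG": "P",
--     "CAA": "Q", "CAG": "Q",
--     "CGU": "R", "CGC": "R", "CGA": "R", "CGG": "R", "AGA": "R", "AGG": "R",
--     "UCU": "S", "UCC": "S", "UCA": "S", "UCG": "S", "AGU": "S", "AGC": "S",
--     "ACU": "T", "ACC": "T", "ACA": "T", "ACG": "T",
--     "GUU": "V", "GUC": "V", "GUA": "V", "GUG": "V",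
--     "UGG": "W",
--     "UAU": "Y", "UAC": "Y",
--     "UAA": "_", "UAG": "_", "UGA": "_"
-- }
--
-- def RevTrans(protein):
--     mRNAs = [[] for i in range(len(protein))]
--     for i in range(len(protein)):
--         aa = protein[i]
--         for key in RNA_Codons:
--             if RNA_Codons[key] == aa:
--                 mRNAs[i].append(key)
--     return mRNAs
-- ===== SOURCE B (Python) =====
-- # The reverse table amino acid -> codons, written out directly (codons listed in
-- # the same order as they appear in the forward RNA_Codons table of the module).
-- CODONS_BY_AA = {
--     "A": ["GCU", "GCC", "GCA", "GCG"],
--     "C": ["UGU", "UGC"],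
--     "D": ["GAU", "GAC"],
--     "E": ["GAA", "GAG"],
--     "F": ["UUU", "UUC"],
--     "G": ["GGU", "GGC", "GGA", "GGG"],
--     "H": ["CAU", "CAC"],
--     "I": ["AUA", "AUU", "AUC"],
--     "K": ["AAA", "AAG"],
--     "L": ["UUA", "UUG", "CUU", "CUC", "CUA", "CUG"],
--     "M": ["AUG"],
--     "N": ["AAU", "AAC"],
--     "P": ["CCU", "CCC", "CCA", "CCG"],
--     "Q": ["CAA", "CAG"],
--     "R": ["CGU", "CGC", "CGA", "CGG", "AGA", "AGG"],
--     "S": ["UCU", "UCC", "UCA", "UCG", "AGU", "AGC"],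
--     "T": ["ACU", "ACC", "ACA", "ACG"],
--     "V": ["GUU", "GUC", "GUA", "GUG"],
--     "W": ["UGG"],
--     "Y": ["UAU", "UAC"],
--     "_": ["UAA", "UAG", "UGA"],
-- }
--
-- def RevTrans(protein):
--     # one direct table lookup per position; fresh list each time
--     return [list(CODONS_BY_AA.get(aa, [])) for aa in protein]
-- ===== Notes on version B (the rewrite author's own statement) =====
-- stated objective: faster
-- what changed: Replaces the per-position 64-entry scan of the forward codon table with a single lookup per position in an explicit reverse table (amino acid -> codon list) written out as a module constant.
import Mathlib
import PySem

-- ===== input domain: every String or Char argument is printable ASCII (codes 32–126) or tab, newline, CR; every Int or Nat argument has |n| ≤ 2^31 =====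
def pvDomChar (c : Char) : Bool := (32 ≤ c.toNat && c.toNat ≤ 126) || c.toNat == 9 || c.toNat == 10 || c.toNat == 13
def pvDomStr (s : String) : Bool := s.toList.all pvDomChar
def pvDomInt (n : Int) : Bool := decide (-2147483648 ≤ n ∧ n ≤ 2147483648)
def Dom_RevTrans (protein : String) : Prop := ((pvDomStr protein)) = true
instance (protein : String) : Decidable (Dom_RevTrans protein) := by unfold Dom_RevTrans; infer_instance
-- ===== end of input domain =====

-- B answers each protein position by one lookup in an explicit reverse table
-- (amino acid -> codon list) instead of A's 64-entry scan of the forward table per position (faster).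


-- ===== PORT A =====
-- module-level constant used by A (the Python dict literal)
def RNA_Codons : PySem.Dict String String := PySem.Dict.ofList [
    ("GCU", "A"), ("GCC", "A"), ("GCA", "A"), ("GCG", "A"),
    ("UGU", "C"), ("UGC", "C"), ("GAU", "D"), ("GAC", "D"),
    ("GAA", "E"), ("GAG", "E"), ("UUU", "F"), ("UUC", "F"),
    ("GGU", "G"), ("GGC", "G"), ("GGA", "G"), ("GGG", "G"),
    ("CAU", "H"), ("CAC", "H"), ("AUA", "I"), ("AUU", "I"),
    ("AUC", "I"), ("AAA", "K"), ("AAG", "K"), ("UUA", "L"),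
    ("UUG", "L"), ("CUU", "L"), ("CUC", "L"), ("CUA", "L"),
    ("CUG", "L"), ("AUG", "M"), ("AAU", "N"), ("AAC", "N"),
    ("CCU", "P"), ("CCC", "P"), ("CCA", "P"), ("CCG", "P"),
    ("CAA", "Q"), ("CAG", "Q"), ("CGU", "R"), ("CGC", "R"),
    ("CGA", "R"), ("CGG", "R"), ("AGA", "R"), ("AGG", "R"),
    ("UCU", "S"), ("UCC", "S"), ("UCA", "S"), ("UCG", "S"),
    ("AGU", "S"), ("AGC", "S"), ("ACU", "T"), ("ACC", "T"),
    ("ACA", "T"), ("ACG", "T"), ("GUU", "V"), ("GUC", "V"),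
    ("GUA", "V"), ("GUG", "V"), ("UGG", "W"), ("UAU", "Y"),
    ("UAC", "Y"), ("UAA", "_"), ("UAG", "_"), ("UGA", "_")]

-- mRNAs = [[] for i in range(len(protein))]; for i in range(len(protein)):
--   aa = protein[i]; for key in RNA_Codons: if RNA_Codons[key] == aa: mRNAs[i].append(key)
-- (protein[i] is always in range, so the `none` branch of pyGet? is unreachable;
--  RNA_Codons[key] is ported as getD with default "" — key always comes from the dict itself)
def RevTrans (protein : String) : List (List String) :=
  (PySem.List.pyRange 0 (PySem.Str.len protein) 1).foldl
    (fun mRNAs i =>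
      match PySem.Str.pyGet? protein i with
      | none => mRNAs
      | some aa =>
        (PySem.Dict.keys RNA_Codons).foldl
          (fun m key =>
            if PySem.Dict.getD RNA_Codons key "" == String.ofList [aa] then
              List.modify m i.toNat (fun l => l ++ [key])
            else m)
          mRNAs)
    ((PySem.List.pyRange 0 (PySem.Str.len protein) 1).map (fun _ => ([] : List String)))

-- ===== PORT B =====
-- module-level constant of B: the reverse table written out directly
def CODONS_BY_AA : PySem.Dict String (List String) := PySem.Dict.ofList [
    ("A", ["GCU", "GCC", "GCA", "GCG"]),
    ("C", ["UGU", "UGC"]),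
    ("D", ["GAU", "GAC"]),
    ("E", ["GAA", "GAG"]),
    ("F", ["UUU", "UUC"]),
    ("G", ["GGU", "GGC", "GGA", "GGG"]),
    ("H", ["CAU", "CAC"]),
    ("I", ["AUA", "AUU", "AUC"]),
    ("K", ["AAA", "AAG"]),
    ("L", ["UUA", "UUG", "CUU", "CUC", "CUA", "CUG"]),
    ("M", ["AUG"]),
    ("N", ["AAU", "AAC"]),
    ("P", ["CCU", "CCC", "CCA", "CCG"]),
    ("Q", ["CAA", "CAG"]),
    ("R", ["CGU", "CGC", "CGA", "CGG", "AGA", "AGG"]),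
    ("S", ["UCU", "UCC", "UCA", "UCG", "AGU", "AGC"]),
    ("T", ["ACU", "ACC", "ACA", "ACG"]),
    ("V", ["GUU", "GUC", "GUA", "GUG"]),
    ("W", ["UGG"]),
    ("Y", ["UAU", "UAC"]),
    ("_", ["UAA", "UAG", "UGA"])]

-- return [list(CODONS_BY_AA.get(aa, [])) for aa in protein]
-- (list(...) copies the looked-up list; on values this is the identity)
def RevTrans_alt (protein : String) : List (List String) :=
  protein.toList.map (fun aa => PySem.Dict.getD CODONS_BY_AA (String.ofList [aa]) [])

-- ===== PRECONDITION & SPEC =====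
def Spec_RevTrans (protein : String) (out : List (List String)) : Prop := out = RevTrans_alt protein
instance (protein : String) (out : List (List String)) : Decidable (Spec_RevTrans protein out) := by unfold Spec_RevTrans; infer_instance

-- ===== CLAIM (what is proved, stated in full; the proofs are below) =====
def Claim_equal_RevTrans : Prop := ∀ (protein : String), Dom_RevTrans protein → Spec_RevTrans protein (RevTrans protein)

-- ===== LEMMAS AND PROOFS =====

-- the per-character answer A computes: the keys of the forward table whose value is s
def pvScan (s : String) : List String :=
  ((PySem.Dict.items RNA_Codons).filter (fun p => p.2 == s)).map (fun p => p.1)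

set_option maxRecDepth 4000 in
theorem pvKeysNodup : (PySem.Dict.keys RNA_Codons).Nodup := by decide

-- A's inner scan (fold over the keys with a lookup) equals the filtered table
theorem pvA_scan (s : String) :
    (PySem.Dict.keys RNA_Codons).foldl
      (fun acc key => if PySem.Dict.getD RNA_Codons key "" == s then acc ++ [key] else acc) []
      = pvScan s := by
  have h := PySem.Dict.items_eq_map_keys RNA_Codons pvKeysNodup ""
  have h2 := PySem.List.foldl_append_if
    (fun (p : String × String) => p.2 == s) (fun (p : String × String) => p.1)
    (PySem.Dict.items RNA_Codons) []
  calc (PySem.Dict.keys RNA_Codons).foldl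
        (fun acc key => if PySem.Dict.getD RNA_Codons key "" == s then acc ++ [key] else acc) []
      = ((PySem.Dict.keys RNA_Codons).map
          (fun k => (k, PySem.Dict.getD RNA_Codons k ""))).foldl
          (fun acc p => if p.2 == s then acc ++ [p.1] else acc) [] := by
        rw [List.foldl_map]
    _ = (PySem.Dict.items RNA_Codons).foldl
          (fun acc p => if p.2 == s then acc ++ [p.1] else acc) [] := by rw [← h]
    _ = pvScan s := by simpa [pvScan] using h2

-- for EVERY string s, A's scan of the forward table agrees with B's reverse-table lookup
set_option maxRecDepth 8000 in
set_option maxHeartbeats 2000000 in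
theorem pvTable (s : String) : pvScan s = PySem.Dict.getD CODONS_BY_AA s [] := by
  by_cases hA : s = "A"; · subst hA; decide
  by_cases hC : s = "C"; · subst hC; decide
  by_cases hD : s = "D"; · subst hD; decide
  by_cases hE : s = "E"; · subst hE; decide
  by_cases hF : s = "F"; · subst hF; decide
  by_cases hG : s = "G"; · subst hG; decide
  by_cases hH : s = "H"; · subst hH; decide
  by_cases hI : s = "I"; · subst hI; decide
  by_cases hK : s = "K"; · subst hK; decide
  by_cases hL : s = "L"; · subst hL; decide
  by_cases hM : s = "M"; · subst hM; decide
  by_cases hN : s = "N"; · subst hN; decide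
  by_cases hP : s = "P"; · subst hP; decide
  by_cases hQ : s = "Q"; · subst hQ; decide
  by_cases hR : s = "R"; · subst hR; decide
  by_cases hS : s = "S"; · subst hS; decide
  by_cases hT : s = "T"; · subst hT; decide
  by_cases hV : s = "V"; · subst hV; decide
  by_cases hW : s = "W"; · subst hW; decide
  by_cases hY : s = "Y"; · subst hY; decide
  by_cases h_ : s = "_"; · subst h_; decide
  -- s matches no amino-acid letter: both sides are []
  have hbeq : ∀ t : String, s ≠ t → (t == s) = false := by
    intro t ht
    exact beq_false_of_ne (fun h => ht h.symm)
  have hfil : (PySem.Dict.items RNA_Codons).filter (fun p => p.2 == s) = [] := by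
    apply List.filter_eq_nil_iff.mpr
    intro p hp
    have hv : p.2 ∈ (PySem.Dict.items RNA_Codons).map (fun q => q.2) :=
      List.mem_map_of_mem hp
    intro hps
    have hsp : s = p.2 := (eq_of_beq hps).symm
    rw [← hsp] at hv
    revert hv
    simp only [show (PySem.Dict.items RNA_Codons).map (fun q => q.2)
        = ["A","A","A","A","C","C","D","D","E","E","F","F","G","G","G","G","H","H",
           "I","I","I","K","K","L","L","L","L","L","L","M","N","N","P","P","P","P",
           "Q","Q","R","R","R","R","R","R","S","S","S","S","S","S","T","T","T","T",
           "V","V","V","V","W","Y","Y","_","_","_"] from by decide,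
      List.mem_cons, List.not_mem_nil]
    intro hv
    rcases hv with h|h|h|h|h|h|h|h|h|h|h|h|h|h|h|h|h|h|h|h|h|h|h|h|h|h|h|h|h|h|h|h|
      h|h|h|h|h|h|h|h|h|h|h|h|h|h|h|h|h|h|h|h|h|h|h|h|h|h|h|h|h|h|h|h|h <;>
      first
        | exact hA h | exact hC h | exact hD h | exact hE h | exact hF h | exact hG h
        | exact hH h | exact hI h | exact hK h | exact hL h | exact hM h | exact hN h
        | exact hP h | exact hQ h | exact hR h | exact hS h | exact hT h | exact hV h
        | exact hW h | exact hY h | exact h_ h | exact h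
  have hget : PySem.Dict.get? CODONS_BY_AA s = none := by
    have hmk : CODONS_BY_AA = PySem.Dict.mk [
        ("A", ["GCU", "GCC", "GCA", "GCG"]), ("C", ["UGU", "UGC"]),
        ("D", ["GAU", "GAC"]), ("E", ["GAA", "GAG"]), ("F", ["UUU", "UUC"]),
        ("G", ["GGU", "GGC", "GGA", "GGG"]), ("H", ["CAU", "CAC"]),
        ("I", ["AUA", "AUU", "AUC"]), ("K", ["AAA", "AAG"]),
        ("L", ["UUA", "UUG", "CUU", "CUC", "CUA", "CUG"]), ("M", ["AUG"]),
        ("N", ["AAU", "AAC"]), ("P", ["CCU", "CCC", "CCA", "CCG"]),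
        ("Q", ["CAA", "CAG"]), ("R", ["CGU", "CGC", "CGA", "CGG", "AGA", "AGG"]),
        ("S", ["UCU", "UCC", "UCA", "UCG", "AGU", "AGC"]),
        ("T", ["ACU", "ACC", "ACA", "ACG"]), ("V", ["GUU", "GUC", "GUA", "GUG"]),
        ("W", ["UGG"]), ("Y", ["UAU", "UAC"]), ("_", ["UAA", "UAG", "UGA"])] := by decide
    rw [hmk]
    simp [hbeq _ hA, hbeq _ hC, hbeq _ hD, hbeq _ hE, hbeq _ hF, hbeq _ hG, hbeq _ hH,
      hbeq _ hI, hbeq _ hK, hbeq _ hL, hbeq _ hM, hbeq _ hN, hbeq _ hP, hbeq _ hQ,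
      hbeq _ hR, hbeq _ hS, hbeq _ hT, hbeq _ hV, hbeq _ hW, hbeq _ hY, hbeq _ h_,
      PySem.Dict.get?]
  rw [pvScan, hfil, PySem.Dict.getD_eq_get?_getD, hget]
  rfl

-- List.modify at the boundary of an append (index given with a proof it is the boundary)
theorem pvModify_append (pre : List (List String)) (x : List String) (suf : List (List String))
    (f : List String → List String) (j : Nat) (hj : j = pre.length) :
    List.modify (pre ++ x :: suf) j f = pre ++ f x :: suf := by
  subst hj
  induction pre with
  | nil => simp [List.modify_zero_cons]
  | cons a l ih => simpa [List.modify_succ_cons] using ih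

-- two modifies at the same index compose
theorem pvModify_modify (l : List (List String)) (j : Nat)
    (f g : List String → List String) :
    List.modify (List.modify l j f) j g = List.modify l j (fun x => g (f x)) := by
  induction l generalizing j with
  | nil => simp [List.modify_nil]
  | cons a t ih =>
    cases j with
    | zero => simp [List.modify_zero_cons]
    | succ j => simp [List.modify_succ_cons, ih]

-- A's inner key loop collapses to a single modify appending the filtered keys
theorem pvInner_collapse (P : String → Bool) (L : List String) :
    ∀ (m : List (List String)) (j : Nat),
      L.foldl (fun m key => if P key then List.modify m j (fun l => l ++ [key]) else m) m
        = List.modify m j (fun l => l ++ L.filter P) := by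
  induction L with
  | nil =>
    intro m j
    simp only [List.foldl_nil, List.filter_nil, List.append_nil]
    have : (fun (l : List String) => l) = id := rfl
    rw [this, List.modify_id]
  | cons k L ih =>
    intro m j
    by_cases hk : P k = true
    · simp only [List.foldl_cons, if_true, ih, pvModify_modify, List.filter_cons, hk]
      simp [List.append_assoc]
    · simp only [List.foldl_cons, hk, ih, List.filter_cons]
      simp

-- the outer index loop over `range` fills position j with f cs[j]
theorem pvOuter (cs : List Char) (f : Char → List String) :
    ∀ (j : Nat), j ≤ cs.length →
      (List.range j).foldl
        (fun m k =>
          match cs[k]? with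
          | none => m
          | some c => List.modify m k (fun l => l ++ f c))
        (List.replicate cs.length ([] : List String))
        = (cs.take j).map f ++ List.replicate (cs.length - j) [] := by
  intro j
  induction j with
  | zero => intro _; simp
  | succ j ih =>
    intro hj
    have hj' : j < cs.length := hj
    rw [List.range_succ, List.foldl_append, ih (Nat.le_of_lt hj')]
    have hget : cs[j]? = some cs[j] := List.getElem?_eq_getElem hj'
    cases hc : cs[j]? with
    | none => rw [hget] at hc; exact absurd hc (by simp)
    | some c =>
      simp only [List.foldl_cons, List.foldl_nil, hc]
      have hrep : List.replicate (cs.length - j) ([] : List String)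
          = ([] : List String) :: List.replicate (cs.length - (j+1)) [] := by
        have hn : cs.length - j = (cs.length - (j+1)) + 1 := by omega
        rw [hn, List.replicate_succ]
      have hlen : j = ((cs.take j).map f).length := by
        simp [List.length_take, Nat.min_eq_left (Nat.le_of_lt hj')]
      rw [hrep, pvModify_append ((cs.take j).map f) [] _ _ j hlen]
      have ht : cs.take (j+1) = cs.take j ++ [c] := by
        rw [List.take_add_one, hc]; rfl
      simp [ht]

-- ===== VERDICT (by name: the statement is the Claim_ definition above) =====
set_option maxRecDepth 4000 in
theorem RevTrans_spec : Claim_equal_RevTrans := by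
  intro protein _
  unfold Spec_RevTrans RevTrans RevTrans_alt
  have hlen : PySem.Str.len protein = ((protein.toList.length : Nat) : Int) :=
    PySem.Str.len_eq protein
  rw [hlen, PySem.List.pyRange_zero_nat]
  rw [List.foldl_map]
  have hinit : ((List.range protein.toList.length).map (fun (k : Nat) => ((k : Int)))).map
      (fun _ => ([] : List String)) = List.replicate protein.toList.length [] := by
    rw [List.map_map]
    have hcomp : ((fun _ => ([] : List String)) ∘ fun (k : Nat) => ((k : Int)))
        = fun _ => ([] : List String) := rfl
    rw [hcomp, List.map_const', List.length_range]
  rw [hinit]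
  have hstep :
      (List.range protein.toList.length).foldl
        (fun m (k : Nat) =>
          match PySem.Str.pyGet? protein ((k : Int)) with
          | none => m
          | some aa =>
            (PySem.Dict.keys RNA_Codons).foldl
              (fun m key =>
                if PySem.Dict.getD RNA_Codons key "" == String.ofList [aa] then
                  List.modify m ((k : Int)).toNat (fun l => l ++ [key])
                else m)
              m)
        (List.replicate protein.toList.length [])
      = (List.range protein.toList.length).foldl
        (fun m (k : Nat) =>
          match protein.toList[k]? with
          | none => m
          | some c => List.modify m k (fun l => l ++ pvScan (String.ofList [c])))
        (List.replicate protein.toList.length []) := by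
    apply PySem.List.foldl_congr_mem
    intro m k _
    have hg : PySem.Str.pyGet? protein ((k : Int)) = protein.toList[k]? :=
      PySem.Str.pyGet?_natCast protein k
    rw [hg]
    cases h : protein.toList[k]? with
    | none => rfl
    | some c =>
      have hcol := pvInner_collapse
        (fun key => PySem.Dict.getD RNA_Codons key "" == String.ofList [c])
        (PySem.Dict.keys RNA_Codons) m ((k : Int)).toNat
      have hsc : (PySem.Dict.keys RNA_Codons).filter
          (fun key => PySem.Dict.getD RNA_Codons key "" == String.ofList [c])
          = pvScan (String.ofList [c]) := by
        have hs := pvA_scan (String.ofList [c])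
        rw [PySem.List.foldl_append_if_eq_filter, List.nil_append] at hs
        exact hs
      have hfin : (m.modify ((k : Int)).toNat fun l =>
            l ++ (PySem.Dict.keys RNA_Codons).filter
              (fun key => PySem.Dict.getD RNA_Codons key "" == String.ofList [c]))
          = m.modify k fun l => l ++ pvScan (String.ofList [c]) := by
        rw [Int.toNat_natCast, hsc]
      exact hcol.trans hfin
  rw [hstep, pvOuter protein.toList (fun c => pvScan (String.ofList [c]))
    protein.toList.length (le_refl _)]
  simp [pvTable]
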